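-- pv_equiv track=rewrite | github.com/cybernetic-physics/rl-nethack | rl/dagger.py | _matches_row_selection_policy
-- ===== SOURCE A (Python) =====
-- ROW_SELECTION_POLICIES = {"all", "disagreement", "loop_risk", "failure_slice", "weak_action", "hard_only"}
--
-- def _matches_row_selection_policy(row: dict, row_selection_policy: str) -> bool:
--     if row_selection_policy not in ROW_SELECTION_POLICIES:
--         raise ValueError(f"Unknown row_selection_policy: {row_selection_policy}")
--     if row_selection_policy == "all":
--         return True
--     if row_selection_policy == "disagreement":
--         return bool(row.get("is_disagreement_candidate", False))
--     if row_selection_policy == "loop_risk":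
--         return bool(row.get("is_loop_risk", False))
--     if row_selection_policy == "failure_slice":
--         return bool(row.get("is_failure_slice", False))
--     if row_selection_policy == "weak_action":
--         return bool(row.get("is_weak_action", False))
--     return any(
--         bool(row.get(key, False))
--         for key in ("is_disagreement_candidate", "is_loop_risk", "is_failure_slice", "is_weak_action")
--     )
-- ===== SOURCE B (Python) =====
-- ROW_SELECTION_POLICIES = {"all", "disagreement", "loop_risk", "failure_slice", "weak_action", "hard_only"}
--
-- _FLAG_POLICY = {
--     "is_disagreement_candidate": "disagreement",
--     "is_loop_risk": "loop_risk",
--     "is_failure_slice": "failure_slice",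
--     "is_weak_action": "weak_action",
-- }
--
-- def _matches_row_selection_policy(row: dict, row_selection_policy: str) -> bool:
--     if row_selection_policy not in ROW_SELECTION_POLICIES:
--         raise ValueError(f"Unknown row_selection_policy: {row_selection_policy}")
--     if row_selection_policy == "all":
--         return True
--     for key, value in row.items():
--         policy = _FLAG_POLICY.get(key)
--         if policy is None:
--             continue
--         if value and (row_selection_policy == policy or row_selection_policy == "hard_only"):
--             return True
--     return False
-- ===== Notes on version B (the rewrite author's own statement) =====
-- stated objective: alternative
-- what changed: Inverts the traversal: instead of looking up policy-selected keys in the row, B scans the row's items once, classifies each key through a reverse flag->policy map, and returns on the first relevant truthy flag.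
import Mathlib
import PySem

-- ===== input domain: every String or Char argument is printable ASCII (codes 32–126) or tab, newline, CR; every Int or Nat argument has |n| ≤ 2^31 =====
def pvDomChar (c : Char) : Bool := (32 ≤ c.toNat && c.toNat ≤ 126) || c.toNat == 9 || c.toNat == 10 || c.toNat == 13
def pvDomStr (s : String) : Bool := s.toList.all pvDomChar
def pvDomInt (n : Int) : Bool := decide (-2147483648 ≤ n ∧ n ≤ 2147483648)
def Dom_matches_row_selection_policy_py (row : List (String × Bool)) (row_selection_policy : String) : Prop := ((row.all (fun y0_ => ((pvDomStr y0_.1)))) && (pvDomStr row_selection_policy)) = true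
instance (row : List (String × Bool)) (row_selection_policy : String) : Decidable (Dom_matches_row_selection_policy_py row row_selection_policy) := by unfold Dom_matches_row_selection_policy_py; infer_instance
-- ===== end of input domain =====

-- B inverts the traversal: it scans the row's items once, classifying each key through a reverse flag→policy map, instead of A's lookups of policy-selected keys (alternative decomposition; same behaviour).

-- ===== PORT A =====
def ROW_SELECTION_POLICIES : PySem.Set String :=
  PySem.Set.ofList ["all", "disagreement", "loop_risk", "failure_slice", "weak_action", "hard_only"]

-- literal transliteration of A; the 'raise ValueError' branch is excluded by Pre_ (port returns false there, unclaimed)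
def matches_row_selection_policy_py (row : List (String × Bool)) (row_selection_policy : String) : Bool :=
  if ¬ (ROW_SELECTION_POLICIES.contains row_selection_policy) then false  -- raise ValueError (outside Pre_)
  else if row_selection_policy == "all" then true
  else if row_selection_policy == "disagreement" then PySem.Dict.getD (PySem.Dict.mk row) "is_disagreement_candidate" false
  else if row_selection_policy == "loop_risk" then PySem.Dict.getD (PySem.Dict.mk row) "is_loop_risk" false
  else if row_selection_policy == "failure_slice" then PySem.Dict.getD (PySem.Dict.mk row) "is_failure_slice" false
  else if row_selection_policy == "weak_action" then PySem.Dict.getD (PySem.Dict.mk row) "is_weak_action" false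
  else ["is_disagreement_candidate", "is_loop_risk", "is_failure_slice", "is_weak_action"].any
    (fun key => PySem.Dict.getD (PySem.Dict.mk row) key false)

-- ===== PORT B =====
def FLAG_POLICY : PySem.Dict String String :=
  PySem.Dict.mk [("is_disagreement_candidate", "disagreement"),
   ("is_loop_risk", "loop_risk"),
   ("is_failure_slice", "failure_slice"),
   ("is_weak_action", "weak_action")]

-- 'for key, value in row.items()': the Python dict holds each key once, with its first-match
-- value, so on the assoc-list representation the scan skips keys already seen — exact dict iteration.
def bLoop (p : String) (seen : PySem.Set String) : List (String × Bool) → Bool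
  | [] => false
  | (k, v) :: t =>
    if seen.contains k then bLoop p seen t
    else
      match PySem.Dict.get? FLAG_POLICY k with
      | none => bLoop p (PySem.Set.add seen k) t
      | some pol =>
        if v && (p == pol || p == "hard_only") then true
        else bLoop p (PySem.Set.add seen k) t

def matches_row_selection_policy_py_alt (row : List (String × Bool)) (row_selection_policy : String) : Bool :=
  if ¬ (ROW_SELECTION_POLICIES.contains row_selection_policy) then false  -- raise ValueError (outside Pre_)
  else if row_selection_policy == "all" then true
  else bLoop row_selection_policy PySem.Set.empty row

-- ===== PRECONDITION & SPEC =====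
-- A raises ValueError on any policy string outside the six known ones; Pre_ admits exactly the known policies.
def Pre_matches_row_selection_policy_py (row : List (String × Bool)) (row_selection_policy : String) : Prop :=
  row_selection_policy = "all" ∨ row_selection_policy = "disagreement" ∨ row_selection_policy = "loop_risk" ∨
  row_selection_policy = "failure_slice" ∨ row_selection_policy = "weak_action" ∨ row_selection_policy = "hard_only"
instance (row : List (String × Bool)) (row_selection_policy : String) : Decidable (Pre_matches_row_selection_policy_py row row_selection_policy) := by unfold Pre_matches_row_selection_policy_py; infer_instance
def pvWitness_matches_row_selection_policy_py : (List (String × Bool)) × String := ([("is_loop_risk", true)], "loop_risk")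
def Spec_matches_row_selection_policy_py (row : List (String × Bool)) (row_selection_policy : String) (out : Bool) : Prop := out = matches_row_selection_policy_py_alt row row_selection_policy
instance (row : List (String × Bool)) (row_selection_policy : String) (out : Bool) : Decidable (Spec_matches_row_selection_policy_py row row_selection_policy out) := by unfold Spec_matches_row_selection_policy_py; infer_instance

-- ===== CLAIM =====
def Claim_equal_matches_row_selection_policy_py : Prop := ∀ (row : List (String × Bool)) (row_selection_policy : String), Dom_matches_row_selection_policy_py row row_selection_policy → Pre_matches_row_selection_policy_py row row_selection_policy → Spec_matches_row_selection_policy_py row row_selection_policy (matches_row_selection_policy_py row row_selection_policy)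

-- ===== LEMMAS AND PROOFS =====

-- B's single scan over the items equals, for each of the four flag keys, a first-match lookup
-- guarded by that key's policy being relevant and by the key not having been seen yet.
lemma bLoop_eq (p : String) (l : List (String × Bool)) (seen : PySem.Set String) :
    bLoop p seen l =
      (["is_disagreement_candidate", "is_loop_risk", "is_failure_slice", "is_weak_action"].any
        (fun key =>
          (match PySem.Dict.get? FLAG_POLICY key with
           | none => false
           | some pol => p == pol || p == "hard_only")
          && !(seen.contains key) && PySem.Dict.getD (PySem.Dict.mk l) key false)) := by
  induction l generalizing seen with
  | nil => simp [bLoop, PySem.Dict.getD_eq_get?_getD, PySem.Dict.get?]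
  | cons kv t ih =>
    obtain ⟨k, v⟩ := kv
    rw [bLoop]
    by_cases h1 : k = "is_disagreement_candidate"
    · subst h1
      by_cases hseen : PySem.Set.contains seen "is_disagreement_candidate" = true <;>
        simp_all [ih, FLAG_POLICY, PySem.Dict.get?_mk_cons, PySem.Dict.getD_eq_get?_getD,
          Bool.beq_eq_decide_eq, PySem.Set.mem_add] <;>
        cases v <;> simp_all <;> try ac_rfl
    · by_cases h2 : k = "is_loop_risk"
      · subst h2
        by_cases hseen : PySem.Set.contains seen "is_loop_risk" = true <;>
          simp_all [ih, FLAG_POLICY, PySem.Dict.get?_mk_cons, PySem.Dict.getD_eq_get?_getD,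
            Bool.beq_eq_decide_eq, PySem.Set.mem_add] <;>
          cases v <;> simp_all <;> try ac_rfl
      · by_cases h3 : k = "is_failure_slice"
        · subst h3
          by_cases hseen : PySem.Set.contains seen "is_failure_slice" = true <;>
            simp_all [ih, FLAG_POLICY, PySem.Dict.get?_mk_cons, PySem.Dict.getD_eq_get?_getD,
              Bool.beq_eq_decide_eq, PySem.Set.mem_add] <;>
            cases v <;> simp_all <;> try ac_rfl
        · by_cases h4 : k = "is_weak_action"
          · subst h4
            by_cases hseen : PySem.Set.contains seen "is_weak_action" = true <;>
              simp_all [ih, FLAG_POLICY, PySem.Dict.get?_mk_cons, PySem.Dict.getD_eq_get?_getD,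
                Bool.beq_eq_decide_eq, PySem.Set.mem_add] <;>
              cases v <;> simp_all <;> try ac_rfl
          · by_cases hseen : PySem.Set.contains seen k = true <;>
              simp_all [ih, FLAG_POLICY, PySem.Dict.get?_mk_cons, PySem.Dict.getD_eq_get?_getD,
                Bool.beq_eq_decide_eq, PySem.Set.mem_add, PySem.Dict.get?,
                eq_false (Ne.symm h1), eq_false (Ne.symm h2), eq_false (Ne.symm h3), eq_false (Ne.symm h4)]

-- ===== VERDICT =====
theorem matches_row_selection_policy_py_spec : Claim_equal_matches_row_selection_policy_py := by
  intro row p _ hpre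
  unfold Spec_matches_row_selection_policy_py
  rcases hpre with h | h | h | h | h | h <;> subst h <;>
    simp [matches_row_selection_policy_py, matches_row_selection_policy_py_alt,
      ROW_SELECTION_POLICIES, PySem.Set.ofList, PySem.Set.contains, bLoop_eq,
      FLAG_POLICY, PySem.Dict.get?_mk_cons, PySem.Set.empty, List.any]
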